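-- pv_equiv track=rewrite | github.com/SohamW101/Parallel-Transaction-Scheduling-using-DAG-based-Dependency-Resolution | project-root/execution/dependency_analyzer.py | balance_shards
-- ===== SOURCE A (Python) =====
-- from typing import Dict, List, Set, Tuple
--
-- def balance_shards(shards: Dict[int, List], num_followers: int) -> Dict[int, List]:
--     """
--     Distribute shards to followers with load balancing
--
--     Algorithm: First Fit Decreasing (FFD) bin packing
--     1. Sort shards by size (descending)
--     2. Assign each shard to follower with least load
--
--     Args:
--         shards: Dictionary of shards {shard_id: [transactions]}
--         num_followers: Number of follower workers
--
--     Returns: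
--         Dictionary {follower_id: [transactions]}
--     """
--     if num_followers <= 0:
--         raise ValueError("Number of followers must be positive")
--
--     # Sort shards by size (descending)
--     sorted_shards = sorted(shards.items(),
--                          key=lambda x: len(x[1]),
--                          reverse=True)
--
--     # Initialize follower loads
--     follower_loads = [[] for _ in range(num_followers)]
--     follower_sizes = [0] * num_followers
--
--     # Assign each shard to follower with minimum load
--     for shard_id, shard_txs in sorted_shards:
--         min_idx = follower_sizes.index(min(follower_sizes))
--         follower_loads[min_idx].extend(shard_txs)
--         follower_sizes[min_idx] += len(shard_txs)
--
--     return {i: txs for i, txs in enumerate(follower_loads) if txs}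
-- ===== SOURCE B (Python) =====
-- def balance_shards(shards, num_followers):
--     """FFD assignment via a priority queue kept sorted by (load, follower index)."""
--     if num_followers <= 0:
--         raise ValueError("Number of followers must be positive")
--
--     order = sorted(shards.items(), key=lambda x: len(x[1]), reverse=True)
--
--     # queue of (load, follower index), kept sorted ascending; front = least loaded
--     queue = [(0, i) for i in range(num_followers)]
--     buckets = [[] for _ in range(num_followers)]
--
--     for _sid, txs in order:
--         load, idx = queue.pop(0)
--         buckets[idx].extend(txs)
--         entry = (load + len(txs), idx)
--         lo, hi = 0, len(queue)
--         while lo < hi: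
--             mid = (lo + hi) // 2
--             if queue[mid] < entry:
--                 lo = mid + 1
--             else:
--                 hi = mid
--         queue.insert(lo, entry)
--
--     return {i: txs for i, txs in enumerate(buckets) if txs}
-- ===== Notes on version B (the rewrite author's own statement) =====
-- stated objective: faster
-- what changed: Replaces A's per-shard min()+list.index() scans over the load array with a priority queue of (load, follower-index) pairs kept sorted: pop the front for the least-loaded follower and re-insert its updated load at the position found by a hand-written binary search, cutting the per-shard comparison work from O(f) to O(log f).
import Mathlib
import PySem

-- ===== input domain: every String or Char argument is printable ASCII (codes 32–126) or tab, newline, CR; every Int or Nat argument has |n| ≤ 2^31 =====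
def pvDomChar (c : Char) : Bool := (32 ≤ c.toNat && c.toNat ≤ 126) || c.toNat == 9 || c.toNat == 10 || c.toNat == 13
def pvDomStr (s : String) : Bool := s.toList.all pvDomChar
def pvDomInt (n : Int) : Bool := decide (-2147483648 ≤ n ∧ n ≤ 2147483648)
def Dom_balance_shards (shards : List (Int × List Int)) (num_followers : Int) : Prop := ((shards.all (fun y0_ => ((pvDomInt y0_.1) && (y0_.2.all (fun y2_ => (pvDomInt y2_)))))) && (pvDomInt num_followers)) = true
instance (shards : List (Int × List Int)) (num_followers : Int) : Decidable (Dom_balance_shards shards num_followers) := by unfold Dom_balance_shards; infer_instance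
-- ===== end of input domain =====

-- B replaces A's per-shard min()+.index() scans with a sorted priority queue of (load, index) pairs and a hand-written binary search for the insertion position; objective: faster (measured).
-- ===== PORT A =====
-- A's loop body: pick the follower with minimum load by scanning sizes (min, then .index)
def pvStepA (st : List (List Int) × List Int) (p : Int × List Int) : List (List Int) × List Int :=
  let mn := (PySem.List.min? st.2 (fun y => y)).getD 0
  let min_idx : Int := ((PySem.List.index? st.2 mn).getD 0 : Nat)
  (PySem.List.pySetD st.1 min_idx (PySem.List.pyGetD st.1 min_idx [] ++ p.2),
   PySem.List.pySetD st.2 min_idx (PySem.List.pyGetD st.2 min_idx 0 + PySem.List.len p.2))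

-- the final dict comprehension {i: txs for i, txs in enumerate(loads) if txs} (identical line in A and B)
def pvFmt (loads : List (List Int)) : List (Int × List Int) :=
  ((PySem.List.enumerate loads 0).foldl
    (fun d q => if q.2 ≠ [] then d.insert q.1 q.2 else d)
    (PySem.Dict.empty : PySem.Dict Int (List Int))).items

def balance_shards (shards : List (Int × List Int)) (num_followers : Int) : List (Int × List Int) :=
  if num_followers ≤ 0 then []   -- Python raises ValueError here; excluded by Pre_
  else
    let sorted_shards := PySem.List.sorted (PySem.Dict.ofList shards).items (fun x => PySem.List.len x.2) true
    let follower_loads : List (List Int) := (PySem.List.pyRange 0 num_followers 1).map (fun _ => ([] : List Int))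
    let follower_sizes : List Int := PySem.List.pyRepeat [(0 : Int)] num_followers
    pvFmt (sorted_shards.foldl pvStepA (follower_loads, follower_sizes)).1

-- ===== PORT B =====
-- B's comparison queue[k] < entry (Python tuple comparison on int pairs = lexicographic)
def pvPairLt (a b : Int × Int) : Bool := a.1 < b.1 || (a.1 == b.1 && a.2 < b.2)

-- B's hand-written bisect-left while-loop: binary search for the insertion position
def pvBisect (queue : List (Int × Int)) (entry : Int × Int) (lo hi : Nat) : Nat :=
  if lo < hi then   -- mid = (lo + hi) // 2, inlined
    if pvPairLt (PySem.List.pyGetD queue (((lo + hi) / 2 : Nat) : Int) (0, 0)) entry then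
      pvBisect queue entry ((lo + hi) / 2 + 1) hi
    else
      pvBisect queue entry lo ((lo + hi) / 2)
  else lo
termination_by hi - lo
decreasing_by all_goals omega

-- B's loop body: pop the front of the sorted queue, extend that bucket, re-insert the updated load
def pvStepB (st : List (List Int) × List (Int × Int)) (p : Int × List Int) : List (List Int) × List (Int × Int) :=
  match st.2 with
  | [] => st   -- unreachable: the queue always holds num_followers (> 0) entries
  | (load, idx) :: rest =>
    let entry := (load + PySem.List.len p.2, idx)
    (PySem.List.pySetD st.1 idx (PySem.List.pyGetD st.1 idx [] ++ p.2),
     PySem.List.insert rest ((pvBisect rest entry 0 rest.length : Nat) : Int) entry)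

def balance_shards_alt (shards : List (Int × List Int)) (num_followers : Int) : List (Int × List Int) :=
  if num_followers ≤ 0 then []   -- Python raises ValueError here; excluded by Pre_
  else
    let order := PySem.List.sorted (PySem.Dict.ofList shards).items (fun x => PySem.List.len x.2) true
    let queue : List (Int × Int) := (PySem.List.pyRange 0 num_followers 1).map (fun i => ((0 : Int), i))
    let buckets : List (List Int) := (PySem.List.pyRange 0 num_followers 1).map (fun _ => ([] : List Int))
    pvFmt (order.foldl pvStepB (buckets, queue)).1

-- ===== PRECONDITION & SPEC =====
-- Pre_ excludes exactly num_followers <= 0, where A raises ValueError.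
def Pre_balance_shards (shards : List (Int × List Int)) (num_followers : Int) : Prop := 0 < num_followers
instance (shards : List (Int × List Int)) (num_followers : Int) : Decidable (Pre_balance_shards shards num_followers) := by unfold Pre_balance_shards; infer_instance
def pvWitness_balance_shards : (List (Int × List Int)) × Int := ([(1, [10, 20]), (2, [30])], 2)

def Spec_balance_shards (shards : List (Int × List Int)) (num_followers : Int) (out : List (Int × List Int)) : Prop := out = balance_shards_alt shards num_followers
instance (shards : List (Int × List Int)) (num_followers : Int) (out : List (Int × List Int)) : Decidable (Spec_balance_shards shards num_followers out) := by unfold Spec_balance_shards; infer_instance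

-- ===== CLAIM (what is proved, stated in full; the proofs are below) =====
def Claim_equal_balance_shards : Prop := ∀ (shards : List (Int × List Int)) (num_followers : Int), Dom_balance_shards shards num_followers → Pre_balance_shards shards num_followers → Spec_balance_shards shards num_followers (balance_shards shards num_followers)

-- ===== LEMMAS AND PROOFS =====
-- Prop version of the lexicographic order
def pvLtP (a b : Int × Int) : Prop := a.1 < b.1 ∨ (a.1 = b.1 ∧ a.2 < b.2)

-- the list of (load, index) pairs a sizes list denotes, indices starting at n
def pvPairs : List Int → Int → List (Int × Int)
  | [], _ => []
  | s :: t, n => (s, n) :: pvPairs t (n + 1)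

-- reference (linear) insertion of an entry into the sorted queue; the ported binary search lands at the same list
def pvInsertQ (e : Int × Int) : List (Int × Int) → List (Int × Int)
  | [] => [e]
  | q :: rest => if pvPairLt q e then q :: pvInsertQ e rest else e :: q :: rest

theorem pvPairLt_iff (a b : Int × Int) : pvPairLt a b = true ↔ pvLtP a b := by
  simp [pvPairLt, pvLtP]

theorem pvLtP_trans {a b c : Int × Int} (h1 : pvLtP a b) (h2 : pvLtP b c) : pvLtP a c := by
  rcases a with ⟨a1, a2⟩; rcases b with ⟨b1, b2⟩; rcases c with ⟨c1, c2⟩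
  simp only [pvLtP] at *; omega

theorem pvLtP_total {a b : Int × Int} (h : a ≠ b) : pvLtP a b ∨ pvLtP b a := by
  rcases a with ⟨a1, a2⟩; rcases b with ⟨b1, b2⟩
  simp only [pvLtP, Prod.mk.injEq, ne_eq] at *
  omega

theorem pvInsertQ_perm (e : Int × Int) (l : List (Int × Int)) : (pvInsertQ e l).Perm (e :: l) := by
  induction l with
  | nil => simp [pvInsertQ]
  | cons q rest ih =>
    simp only [pvInsertQ]
    split
    · exact (ih.cons q).trans (List.Perm.swap e q rest)
    · exact List.Perm.refl _

theorem pvInsertQ_pairwise (e : Int × Int) (l : List (Int × Int))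
    (hl : l.Pairwise pvLtP) (hc : ∀ x ∈ l, x ≠ e) :
    (pvInsertQ e l).Pairwise pvLtP := by
  induction l with
  | nil => simp [pvInsertQ]
  | cons q rest ih =>
    rcases hl with _ | ⟨hq, hrest⟩
    simp only [pvInsertQ]
    split
    · rename_i hqe
      refine List.Pairwise.cons ?_ (ih hrest (fun x hx => hc x (List.mem_cons_of_mem _ hx)))
      intro x hx
      have hx' := (pvInsertQ_perm e rest).mem_iff.mp hx
      rcases List.mem_cons.mp hx' with rfl | hx''
      · exact (pvPairLt_iff _ _).mp hqe
      · exact hq x hx''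
    · rename_i hqe
      have hqe' : pvLtP e q := by
        rcases pvLtP_total (hc q (List.mem_cons_self)) with h | h
        · exact absurd ((pvPairLt_iff q e).mpr h) (by simpa using hqe)
        · exact h
      refine List.Pairwise.cons ?_ (List.Pairwise.cons hq hrest)
      intro x hx
      rcases List.mem_cons.mp hx with rfl | hx'
      · exact hqe'
      · exact pvLtP_trans hqe' (hq x hx')

theorem pvPairs_length (s : List Int) (n : Int) : (pvPairs s n).length = s.length := by
  induction s generalizing n with
  | nil => rfl
  | cons a t ih => simp [pvPairs, ih]

theorem pvPairs_getElem (s : List Int) (n : Int) (j : Nat) (hj : j < s.length) :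
    (pvPairs s n)[j]'(by rw [pvPairs_length]; exact hj) = (s[j], n + j) := by
  induction s generalizing n j with
  | nil => simp at hj
  | cons a t ih =>
    cases j with
    | zero => simp [pvPairs]
    | succ k =>
      simp only [pvPairs, List.getElem_cons_succ]
      rw [ih (n + 1) k (by simpa using hj)]
      congr 1
      push_cast; ring

theorem pvPairs_mem (s : List Int) (n : Int) (p : Int × Int) :
    p ∈ pvPairs s n ↔ ∃ j : Nat, ∃ _ : j < s.length, p = (s[j], n + j) := by
  induction s generalizing n with
  | nil => simp [pvPairs]
  | cons a t ih =>
    simp only [pvPairs, List.mem_cons, ih]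
    constructor
    · rintro (rfl | ⟨j, hj, rfl⟩)
      · exact ⟨0, by simp, by simp⟩
      · refine ⟨j + 1, by simpa using hj, ?_⟩
        simp only [List.getElem_cons_succ]
        congr 1
        push_cast; ring
    · rintro ⟨j, hj, rfl⟩
      cases j with
      | zero => left; simp
      | succ k =>
        right
        refine ⟨k, by simpa using hj, ?_⟩
        simp only [List.getElem_cons_succ]
        congr 1
        push_cast; ring

theorem pvPairs_set (s : List Int) (n : Int) (j : Nat) (v : Int) (hj : j < s.length) :
    pvPairs (s.set j v) n = (pvPairs s n).set j (v, n + j) := by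
  induction s generalizing n j with
  | nil => simp at hj
  | cons a t ih =>
    cases j with
    | zero => simp [pvPairs]
    | succ k =>
      have hv : (v, n + 1 + (k : Int)) = (v, n + ((k + 1 : Nat) : Int)) := by
        congr 1; push_cast; ring
      simp only [List.set_cons_succ, pvPairs]
      rw [ih (n + 1) k (by simpa using hj), hv]

-- the head of the sorted queue is exactly the (min, first-argmin) pair A's two scans find
theorem pv_head (sizes : List Int) (m i : Int) (rest : List (Int × Int))
    (hperm : ((m, i) :: rest).Perm (pvPairs sizes 0))
    (hpw : ((m, i) :: rest).Pairwise pvLtP) :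
    ∃ j : Nat, ∃ hj : j < sizes.length, i = (j : Int) ∧ sizes[j] = m ∧
      PySem.List.min? sizes (fun y => y) = some m ∧
      PySem.List.index? sizes m = some j := by
  have hmem : (m, i) ∈ pvPairs sizes 0 := hperm.subset List.mem_cons_self
  obtain ⟨j, hj, hje⟩ := (pvPairs_mem sizes 0 (m, i)).mp hmem
  have hm : m = sizes[j] := congrArg Prod.fst hje
  have hi : i = (j : Int) := by have := congrArg Prod.snd hje; simpa using this
  have hmin : ∀ p ∈ pvPairs sizes 0, p = (m, i) ∨ pvLtP (m, i) p := by
    intro p hp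
    rcases List.mem_cons.mp (hperm.symm.subset hp) with rfl | hpr
    · exact Or.inl rfl
    · exact Or.inr ((List.pairwise_cons.mp hpw).1 p hpr)
  have hle : ∀ y ∈ sizes, m ≤ y := by
    intro y hy
    obtain ⟨k, hk, rfl⟩ := List.mem_iff_getElem.mp hy
    rcases hmin (sizes[k], (k : Int)) ((pvPairs_mem sizes 0 _).mpr ⟨k, hk, by simp⟩) with he | hlt
    · have := congrArg Prod.fst he; simpa using this.symm.le
    · rcases hlt with h | ⟨h, _⟩
      · exact le_of_lt h
      · exact le_of_eq h
  have hmemm : m ∈ sizes := hm ▸ List.getElem_mem hj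
  have hmin? : PySem.List.min? sizes (fun y => y) = some m := by
    cases hq : PySem.List.min? sizes (fun y => y) with
    | none =>
      rw [PySem.List.min?_eq_none_iff] at hq
      subst hq; simp at hj
    | some m' =>
      have h1 : m' ≤ m := PySem.List.min?_isMin hq m hmemm
      have h2 : m ≤ m' := hle m' (PySem.List.min?_mem hq)
      rw [le_antisymm h1 h2]
  have hfirst : ∀ k, ∀ hk' : k < sizes.length, k < j → sizes[k] ≠ m := by
    intro k hk' hkj hkm
    rcases hmin (sizes[k], (k : Int)) ((pvPairs_mem sizes 0 _).mpr ⟨k, hk', by simp⟩) with he | hlt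
    · have := congrArg Prod.snd he
      simp [hi] at this
      omega
    · rcases hlt with h | ⟨_, h⟩
      · rw [hkm] at h; exact absurd h (lt_irrefl m)
      · simp [hi] at h; omega
  have hidx : PySem.List.index? sizes m = some j := by
    rw [PySem.List.index?_eq_some_iff]
    refine ⟨sizes.take j, sizes.drop (j + 1), ?_, ?_, ?_⟩
    · conv_lhs => rw [← List.take_append_drop j sizes]
      rw [← List.getElem_cons_drop hj, hm]
    · simp [hj.le]
    · intro hmem'
      obtain ⟨k, hk, hke⟩ := List.mem_iff_getElem.mp hmem'
      have hkj : k < j := lt_of_lt_of_le hk (by simp)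
      have hk' : k < sizes.length := lt_of_lt_of_le hkj hj.le
      exact hfirst k hk' hkj (by rw [List.getElem_take] at hke; exact hke)
  exact ⟨j, hj, hi, hm.symm, hmin?, hidx⟩

-- the binary search returns a boundary position: everything before it is below the entry, nothing from it on is
theorem pvBisect_spec (q : List (Int × Int)) (e : Int × Int) (hq : q.Pairwise pvLtP) :
    ∀ n lo hi, hi - lo ≤ n → lo ≤ hi → hi ≤ q.length →
      (∀ k (hk : k < q.length), k < lo → pvPairLt q[k] e = true) →
      (∀ k (hk : k < q.length), hi ≤ k → pvPairLt q[k] e = false) →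
      pvBisect q e lo hi ≤ q.length ∧
      (∀ k (hk : k < q.length), k < pvBisect q e lo hi → pvPairLt q[k] e = true) ∧
      (∀ k (hk : k < q.length), pvBisect q e lo hi ≤ k → pvPairLt q[k] e = false) := by
  have hsort := List.pairwise_iff_getElem.mp hq
  intro n
  induction n with
  | zero =>
    intro lo hi hn hlh hhl h1 h2
    have : ¬ lo < hi := by omega
    rw [pvBisect, if_neg this]
    exact ⟨by omega, fun k hk hkl => h1 k hk hkl, fun k hk hkl => h2 k hk (by omega)⟩
  | succ n ihn =>
    intro lo hi hn hlh hhl h1 h2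
    by_cases hlt : lo < hi
    · rw [pvBisect, if_pos hlt]
      have hmid1 : lo ≤ (lo + hi) / 2 := by omega
      have hmid2 : (lo + hi) / 2 < hi := by omega
      have hmidlen : (lo + hi) / 2 < q.length := by omega
      have hget : PySem.List.pyGetD q (((lo + hi) / 2 : Nat) : Int) (0, 0) = q[(lo + hi) / 2] := by
        rw [PySem.List.pyGetD_natCast]
        exact List.getD_eq_getElem q (0, 0) hmidlen
      rw [hget]
      by_cases hcmp : pvPairLt q[(lo + hi) / 2] e = true
      · rw [if_pos hcmp]
        refine ihn ((lo + hi) / 2 + 1) hi (by omega) (by omega) hhl ?_ h2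
        intro k hk hkl
        rcases Nat.lt_succ_iff_lt_or_eq.mp hkl with hkm | rfl
        · have hkk : pvLtP q[k] q[(lo + hi) / 2] := hsort k ((lo + hi) / 2) hk hmidlen hkm
          exact (pvPairLt_iff _ _).mpr (pvLtP_trans hkk ((pvPairLt_iff _ _).mp hcmp))
        · exact hcmp
      · rw [if_neg hcmp]
        refine ihn lo ((lo + hi) / 2) (by omega) (by omega) (by omega) h1 ?_
        intro k hk hkl
        rcases Nat.eq_or_lt_of_le hkl with rfl | hkm
        · exact Bool.eq_false_iff.mpr hcmp
        · cases hc : pvPairLt q[k] e with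
          | false => rfl
          | true =>
            exfalso
            have hkk : pvLtP q[(lo + hi) / 2] q[k] := hsort _ k hmidlen hk hkm
            exact hcmp ((pvPairLt_iff _ _).mpr (pvLtP_trans hkk ((pvPairLt_iff _ _).mp hc)))
    · rw [pvBisect, if_neg hlt]
      exact ⟨by omega, fun k hk hkl => h1 k hk hkl, fun k hk hkl => h2 k hk (by omega)⟩

-- inserting at a boundary position of the sorted queue is the linear sorted insertion
theorem pvInsert_eq_insertQ (e : Int × Int) :
    ∀ (q : List (Int × Int)) (pos : Nat), pos ≤ q.length →
      (∀ k (hk : k < q.length), k < pos → pvPairLt q[k] e = true) →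
      (∀ k (hk : k < q.length), pos ≤ k → pvPairLt q[k] e = false) →
      q.take pos ++ e :: q.drop pos = pvInsertQ e q := by
  intro q
  induction q with
  | nil =>
    intro pos hpos _ _
    have h0 : pos = 0 := by simpa using hpos
    subst h0
    rfl
  | cons a t ih =>
    intro pos hpos h1 h2
    cases pos with
    | zero =>
      have ha : pvPairLt a e = false := h2 0 (by simp) (by omega)
      simp [pvInsertQ, ha]
    | succ p =>
      have ha : pvPairLt a e = true := h1 0 (by simp) (by omega)
      simp only [pvInsertQ, ha, if_pos, List.take_succ_cons, List.drop_succ_cons, List.cons_append]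
      rw [ih p (by simpa using hpos)
        (fun k hk hkl => h1 (k + 1) (by simpa using hk) (by omega))
        (fun k hk hkl => h2 (k + 1) (by simpa using hk) (by omega))]

-- the loop invariant transfer: the bucket lists stay equal as long as the queue denotes the sizes list
theorem pv_loop_eq (order : List (Int × List Int)) :
    ∀ (loads : List (List Int)) (sizes : List Int) (queue : List (Int × Int)),
      sizes ≠ [] → queue.Perm (pvPairs sizes 0) → queue.Pairwise pvLtP →
      (order.foldl pvStepA (loads, sizes)).1 = (order.foldl pvStepB (loads, queue)).1 := by
  induction order with
  | nil => intro loads sizes queue _ _ _; rfl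
  | cons p t ih =>
    intro loads sizes queue hne hperm hpw
    match queue with
    | [] =>
      exfalso
      have hnil : pvPairs sizes 0 = [] := hperm.symm.eq_nil
      have := congrArg List.length hnil
      rw [pvPairs_length] at this
      exact hne (List.length_eq_zero_iff.mp this)
    | (m, i) :: rest =>
      obtain ⟨j, hj, hi, hm, hmin?, hidx⟩ := pv_head sizes m i rest hperm hpw
      -- the two steps produce the same bucket list and coupled states
      have hstepA : pvStepA (loads, sizes) p =
          (PySem.List.pySetD loads (j : Int) (PySem.List.pyGetD loads (j : Int) [] ++ p.2),
           sizes.set j (m + (p.2.length : Int))) := by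
        simp only [pvStepA, hmin?, Option.getD_some, hidx]
        simp [PySem.List.pySetD_natCast, PySem.List.pyGetD_natCast, hm, hj]
      have hstepB : pvStepB (loads, (m, i) :: rest) p =
          (PySem.List.pySetD loads (j : Int) (PySem.List.pyGetD loads (j : Int) [] ++ p.2),
           pvInsertQ (m + (p.2.length : Int), i) rest) := by
        have hrpw : rest.Pairwise pvLtP := (List.pairwise_cons.mp hpw).2
        obtain ⟨hle, h1, h2⟩ := pvBisect_spec rest (m + (p.2.length : Int), (j : Int)) hrpw
          rest.length 0 rest.length (by omega) (by omega) le_rfl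
          (fun k hk hkl => absurd hkl (Nat.not_lt_zero k))
          (fun k hk hkl => absurd hkl (by omega))
        simp only [pvStepB, PySem.List.len_eq, hi]
        rw [PySem.List.insert_natCast rest _ _ hle]
        rw [pvInsert_eq_insertQ _ rest _ hle h1 h2]
      -- permutation bookkeeping
      have hPj : (pvPairs sizes 0)[j]'(by rw [pvPairs_length]; exact hj) = (m, i) := by
        rw [pvPairs_getElem sizes 0 j hj, hm, hi]; simp
      have hrest : rest.Perm ((pvPairs sizes 0).eraseIdx j) := by
        have h1 : ((m, i) :: rest).Perm ((m, i) :: (pvPairs sizes 0).eraseIdx j) := by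
          refine hperm.trans ?_
          exact (hPj ▸ List.getElem_cons_eraseIdx_perm (by rw [pvPairs_length]; exact hj)).symm
        exact h1.cons_inv
      have hperm' : (pvInsertQ (m + (p.2.length : Int), i) rest).Perm (pvPairs (sizes.set j (m + (p.2.length : Int))) 0) := by
        have hset : pvPairs (sizes.set j (m + (p.2.length : Int))) 0 = (pvPairs sizes 0).set j (m + (p.2.length : Int), i) := by
          rw [pvPairs_set sizes 0 j (m + (p.2.length : Int)) hj, hi]; simp
        have hjP : j < (pvPairs sizes 0).length := by rw [pvPairs_length]; exact hj
        have h2 : ((pvPairs sizes 0).set j (m + (p.2.length : Int), i)).Perm ((m + (p.2.length : Int), i) :: (pvPairs sizes 0).eraseIdx j) := by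
          rw [List.set_eq_take_cons_drop (m + (p.2.length : Int), i) hjP, List.eraseIdx_eq_take_drop_succ]
          exact List.perm_middle
        rw [hset]
        exact ((pvInsertQ_perm (m + (p.2.length : Int), i) rest).trans (hrest.cons (m + (p.2.length : Int), i))).trans h2.symm
      have hpw' : (pvInsertQ (m + (p.2.length : Int), i) rest).Pairwise pvLtP := by
        refine pvInsertQ_pairwise (m + (p.2.length : Int), i) rest (List.pairwise_cons.mp hpw).2 ?_
        intro x hx hxe
        have hxP : x ∈ pvPairs sizes 0 := hperm.subset (List.mem_cons_of_mem _ hx)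
        obtain ⟨k, hk, rfl⟩ := (pvPairs_mem sizes 0 x).mp hxP
        have hsnd : ((k : Int)) = i := by
          have := congrArg Prod.snd hxe; simpa using this
        have hkj : k = j := by rw [hi] at hsnd; omega
        subst hkj
        have hhead : (sizes[k], ((0 : Int) + (k : Int))) = (m, i) := by
          rw [hm, hi]; simp
        have hrel := (List.pairwise_cons.mp hpw).1 _ hx
        rw [hhead] at hrel
        simp [pvLtP] at hrel
      have hne' : sizes.set j (m + (p.2.length : Int)) ≠ [] := by
        intro hnil
        have hl0 : sizes.length = 0 := by simpa using congrArg List.length hnil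
        omega
      simp only [List.foldl_cons, hstepA, hstepB]
      exact ih _ _ _ hne' hperm' hpw'

theorem pvPairs_replicate (f : Nat) (n : Int) :
    pvPairs (List.replicate f 0) n = (List.range f).map (fun k : Nat => ((0 : Int), n + (k : Int))) := by
  induction f generalizing n with
  | zero => rfl
  | succ m ih =>
    simp only [List.replicate_succ, pvPairs, ih, List.range_succ_eq_map, List.map_cons, List.map_map]
    refine List.cons_eq_cons.mpr ⟨by simp, ?_⟩
    apply List.map_congr_left
    intro k _
    simp only [Function.comp]
    congr 1
    push_cast; ring

theorem pv_initial_perm (f : Nat) :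
    ((List.range f).map (fun k : Nat => ((0 : Int), (k : Int)))).Perm
      (pvPairs (List.replicate f 0) 0) := by
  rw [pvPairs_replicate f 0]
  simp

theorem pv_initial_pairwise (f : Nat) :
    ((List.range f).map (fun k : Nat => ((0 : Int), (k : Int)))).Pairwise pvLtP := by
  rw [List.pairwise_map]
  exact List.pairwise_lt_range.imp (fun h => Or.inr ⟨rfl, Int.ofNat_lt.mpr h⟩)

-- ===== VERDICT (by name: the statement is the Claim_ definition above) =====
-- ===== VERDICT (by name: the statement is the Claim_ definition above) =====
theorem balance_shards_spec : Claim_equal_balance_shards := by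
  intro shards nf _ hpre
  unfold Spec_balance_shards
  unfold Pre_balance_shards at hpre
  unfold balance_shards balance_shards_alt
  rw [if_neg (by omega), if_neg (by omega)]
  show pvFmt ((PySem.List.sorted (PySem.Dict.ofList shards).items (fun x => PySem.List.len x.2) true).foldl pvStepA
      ((PySem.List.pyRange 0 nf 1).map (fun _ => ([] : List Int)), PySem.List.pyRepeat [(0 : Int)] nf)).1 =
    pvFmt ((PySem.List.sorted (PySem.Dict.ofList shards).items (fun x => PySem.List.len x.2) true).foldl pvStepB
      ((PySem.List.pyRange 0 nf 1).map (fun _ => ([] : List Int)),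
       (PySem.List.pyRange 0 nf 1).map (fun i => ((0 : Int), i)))).1
  refine congrArg pvFmt ?_
  set f : Nat := nf.toNat with hf
  have hnf : nf = (f : Int) := by omega
  apply pv_loop_eq
  · rw [PySem.List.pyRepeat_singleton]
    intro hnil
    have := congrArg List.length hnil
    simp at this
    omega
  · rw [PySem.List.pyRepeat_singleton, hnf, PySem.List.pyRange_zero_nat, List.map_map]
    exact pv_initial_perm f
  · rw [hnf, PySem.List.pyRange_zero_nat, List.map_map]
    exact pv_initial_pairwise f
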